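-- pv_equiv track=rewrite | github.com/nathae-san/blackjack-bankroll | scripts/08_normalize_return_oof.py | safe_parse_actions
-- ===== SOURCE A (Python) =====
-- from typing import List
--
-- def safe_parse_actions(x: str) -> List[str]:
--     """
--     actions_taken looks like:
--       "[['H','S']]" or "[['N','S']]" or "[['S']]" or "[]"
--     We convert to flat list of tokens: ["N","S"] etc.
--     """
--     if not isinstance(x, str) or x.strip() == "":
--         return []
--     s = x.strip()
--
--     # Remove brackets and quotes in a simple robust way
--     # Keep letters like H,S,D,P,R,N,I
--     tokens = []
--     cur = ""
--     for ch in s: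
--         if ch.isalpha():
--             cur += ch
--         else:
--             if cur:
--                 tokens.append(cur)
--                 cur = ""
--     if cur:
--         tokens.append(cur)
--     return tokens
-- ===== SOURCE B (Python) =====
-- from itertools import groupby
-- from typing import List
--
-- def safe_parse_actions(x: str) -> List[str]:
--     if not isinstance(x, str) or x.strip() == "":
--         return []
--     return ["".join(g) for k, g in groupby(x.strip(), key=str.isalpha) if k]
-- ===== Notes on version B (the rewrite author's own statement) =====
-- stated objective: idiomatic
-- what changed: Replaces the manual cur-accumulator/flush state machine with itertools.groupby keyed on str.isalpha, keeping the alphabetic runs via a comprehension.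
import Mathlib
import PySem

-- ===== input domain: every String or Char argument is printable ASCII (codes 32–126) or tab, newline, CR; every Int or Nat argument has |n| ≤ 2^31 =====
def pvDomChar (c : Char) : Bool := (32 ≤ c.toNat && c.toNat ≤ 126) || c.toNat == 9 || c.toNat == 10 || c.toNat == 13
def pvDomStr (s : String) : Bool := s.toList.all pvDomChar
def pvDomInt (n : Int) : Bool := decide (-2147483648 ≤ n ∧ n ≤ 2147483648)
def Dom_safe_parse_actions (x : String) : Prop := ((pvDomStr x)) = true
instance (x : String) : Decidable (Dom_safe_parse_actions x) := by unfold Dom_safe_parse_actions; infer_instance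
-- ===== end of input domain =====

-- B replaces A's manual cur-accumulator/flush state machine with a groupby-on-isalpha
-- decomposition (idiomatic; same cost).

-- ===== PORT A =====
-- state: (tokens, cur); the loop body mirrors A's if/else, then the final flush
def safe_parse_actions (x : String) : List String :=
  if PySem.Str.strip x = "" then []
  else
    let s := PySem.Str.strip x
    let st := s.toList.foldl
      (fun (acc : List String × List Char) ch =>
        if PySem.Chars.isalpha ch then (acc.1, acc.2 ++ [ch])
        else if acc.2 ≠ [] then (acc.1 ++ [String.ofList acc.2], []) else acc)
      ([], [])
    if st.2 ≠ [] then st.1 ++ [String.ofList st.2] else st.1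

-- ===== PORT B =====
-- hand port of itertools.groupby with key=str.isalpha: consecutive runs with their key
def pvRuns (cs : List Char) : List (Bool × List Char) :=
  match cs with
  | [] => []
  | c :: cs' =>
    match pvRuns cs' with
    | (k, g) :: rest =>
      if PySem.Chars.isalpha c = k then (k, c :: g) :: rest
      else (PySem.Chars.isalpha c, [c]) :: (k, g) :: rest
    | [] => [(PySem.Chars.isalpha c, [c])]

def safe_parse_actions_alt (x : String) : List String :=
  if PySem.Str.strip x = "" then []
  else ((pvRuns (PySem.Str.strip x).toList).filter (·.1)).map (fun g => String.ofList g.2)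

-- ===== PRECONDITION & SPEC =====
def Spec_safe_parse_actions (x : String) (out : List String) : Prop := out = safe_parse_actions_alt x
instance (x : String) (out : List String) : Decidable (Spec_safe_parse_actions x out) := by unfold Spec_safe_parse_actions; infer_instance

-- ===== CLAIM (what is proved, stated in full; the proofs are below) =====
def Claim_equal_safe_parse_actions : Prop := ∀ (x : String), Dom_safe_parse_actions x → Spec_safe_parse_actions x (safe_parse_actions x)

-- ===== LEMMAS AND PROOFS =====

-- A's semantics with a pending run, tokens factored out
def pvTok (cs : List Char) (l : List Char) : List String :=
  match cs with
  | [] => if l = [] then [] else [String.ofList l]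
  | c :: cs' =>
    if PySem.Chars.isalpha c then pvTok cs' (l ++ [c])
    else if l = [] then pvTok cs' [] else String.ofList l :: pvTok cs' []

-- B's result on a char list
def pvF (cs : List Char) : List String :=
  ((pvRuns cs).filter (·.1)).map (fun g => String.ofList g.2)

theorem pvFoldA_eq_pvTok (cs : List Char) (toks : List String) (l : List Char) :
    (let st := cs.foldl
      (fun (acc : List String × List Char) ch =>
        if PySem.Chars.isalpha ch then (acc.1, acc.2 ++ [ch])
        else if acc.2 ≠ [] then (acc.1 ++ [String.ofList acc.2], []) else acc)
      (toks, l);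
     if st.2 ≠ [] then st.1 ++ [String.ofList st.2] else st.1)
    = toks ++ pvTok cs l := by
  induction cs generalizing toks l with
  | nil =>
    simp only [List.foldl_nil, pvTok]
    by_cases h : l = [] <;> simp [h]
  | cons c cs' ih =>
    simp only [List.foldl_cons, pvTok]
    by_cases ha : PySem.Chars.isalpha c
    · simp only [ha, if_pos]
      exact ih toks (l ++ [c])
    · simp only [ha, if_false, Bool.false_eq_true]
      by_cases hl : l = []
      · simp only [hl, ne_eq, not_true_eq_false, if_false]
        simpa using ih toks ([] : List Char)
      · simp only [ne_eq, hl, not_false_eq_true, if_true]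
        rw [ih (toks ++ [String.ofList l]) []]
        simp

theorem pvRuns_head_key (c : Char) (cs : List Char) :
    ∃ g rest, pvRuns (c :: cs) = (PySem.Chars.isalpha c, g) :: rest := by
  rw [pvRuns]
  cases hr : pvRuns cs with
  | nil => exact ⟨[c], [], rfl⟩
  | cons p rest =>
    obtain ⟨k, g⟩ := p
    by_cases hk : PySem.Chars.isalpha c = k
    · exact ⟨c :: g, rest, by simp [hk]⟩
    · exact ⟨[c], (k, g) :: rest, by simp [hk]⟩

theorem pvRuns_cons_break (c : Char) (cs : List Char)
    (h : ∀ k g rest, pvRuns cs = (k, g) :: rest → PySem.Chars.isalpha c ≠ k) :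
    pvRuns (c :: cs) = (PySem.Chars.isalpha c, [c]) :: pvRuns cs := by
  rw [pvRuns]
  cases hr : pvRuns cs with
  | nil => simp
  | cons p rest =>
    obtain ⟨k, g⟩ := p
    simp [h k g rest hr]

theorem pvRuns_cons_merge (c : Char) (cs : List Char) (k : Bool) (g : List Char)
    (rest : List (Bool × List Char))
    (hr : pvRuns cs = (k, g) :: rest) (hk : PySem.Chars.isalpha c = k) :
    pvRuns (c :: cs) = (k, c :: g) :: rest := by
  rw [pvRuns, hr]; simp [hk]

-- an all-alpha nonempty prefix followed by [] or a non-alpha char is its own run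
theorem pvRuns_alpha_append (l : List Char) (cs : List Char)
    (hl : l ≠ []) (h : ∀ c ∈ l, PySem.Chars.isalpha c = true)
    (hcs : cs = [] ∨ ∃ c cs', cs = c :: cs' ∧ PySem.Chars.isalpha c = false) :
    pvRuns (l ++ cs) = (true, l) :: pvRuns cs := by
  induction l with
  | nil => simp at hl
  | cons a l' ih =>
    have ha : PySem.Chars.isalpha a = true := h a (by simp)
    by_cases hl' : l' = []
    · subst hl'
      simp only [List.singleton_append]
      rcases hcs with h0 | ⟨c, cs', hceq, hcna⟩
      · subst h0; simp [pvRuns, ha]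
      · subst hceq
        obtain ⟨g, rest, hk⟩ := pvRuns_head_key c cs'
        rw [pvRuns_cons_break a (c :: cs')
            (by intro k' g' r' hh; rw [hk] at hh; simp at hh
                rw [ha, ← hh.1.1, hcna]; simp), ha]
    · have hmid := ih hl' (fun d hd => h d (by simp [hd]))
      rw [List.cons_append,
        pvRuns_cons_merge a (l' ++ cs) true l' (pvRuns cs) hmid ha]

theorem pvRuns_alpha (l : List Char) (hl : l ≠ [])
    (h : ∀ c ∈ l, PySem.Chars.isalpha c = true) :
    pvRuns l = [(true, l)] := by
  have := pvRuns_alpha_append l [] hl h (Or.inl rfl)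
  simpa [pvRuns] using this

-- prepending a non-alpha char does not change the filtered runs
theorem pvF_cons_nonalpha (c : Char) (cs : List Char)
    (hc : PySem.Chars.isalpha c = false) :
    pvF (c :: cs) = pvF cs := by
  unfold pvF
  cases hr : pvRuns cs with
  | nil =>
    rw [pvRuns_cons_break c cs (by intro k g r hh; rw [hr] at hh; cases hh), hr]
    simp [hc]
  | cons p rest =>
    obtain ⟨k, g⟩ := p
    cases k with
    | true =>
      rw [pvRuns_cons_break c cs
          (by intro k' g' r' hh; rw [hr] at hh; simp at hh
              simp [hc, hh.1.1]), hr]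
      simp [hc]
    | false =>
      rw [pvRuns_cons_merge c cs false g rest hr hc]
      simp

-- pvTok with an all-alpha pending run = B's filtered runs of (l ++ cs)
theorem pvTok_eq_pvF (cs : List Char) (l : List Char)
    (h : ∀ c ∈ l, PySem.Chars.isalpha c = true) :
    pvTok cs l = pvF (l ++ cs) := by
  induction cs generalizing l with
  | nil =>
    simp only [pvTok, List.append_nil]
    by_cases hl : l = []
    · simp [hl, pvF, pvRuns]
    · rw [if_neg hl]
      unfold pvF
      rw [pvRuns_alpha l hl h]
      simp
  | cons c cs' ih =>
    rw [pvTok]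
    by_cases ha : PySem.Chars.isalpha c
    · rw [if_pos ha, ih (l ++ [c]) (by
        intro d hd
        rcases List.mem_append.mp hd with h1 | h1
        · exact h d h1
        · simp at h1; subst h1; exact ha)]
      simp
    · have ha' : PySem.Chars.isalpha c = false := by simpa using ha
      rw [if_neg ha]
      by_cases hl : l = []
      · rw [if_pos hl, hl, List.nil_append,
          ih [] (by intro d hd; simp at hd), List.nil_append,
          pvF_cons_nonalpha c cs' ha']
      · rw [if_neg hl, ih [] (by intro d hd; simp at hd), List.nil_append]
        have h2 := pvF_cons_nonalpha c cs' ha'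
        unfold pvF at h2 ⊢
        rw [pvRuns_alpha_append l (c :: cs') hl h (Or.inr ⟨c, cs', rfl, ha'⟩)]
        simp [h2]

-- ===== VERDICT (by name: the statement is the Claim_ definition above) =====
theorem safe_parse_actions_spec : Claim_equal_safe_parse_actions := by
  intro x _
  unfold Spec_safe_parse_actions safe_parse_actions safe_parse_actions_alt
  by_cases hs : PySem.Str.strip x = ""
  · simp [hs]
  · rw [if_neg hs, if_neg hs]
    have := pvFoldA_eq_pvTok (PySem.Str.strip x).toList [] []
    simp only [List.nil_append] at this
    rw [this, pvTok_eq_pvF _ [] (by intro d hd; simp at hd), List.nil_append, pvF]
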